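-- pv_equiv track=rewrite | github.com/developerlee79/ps-leetcode | math/leetcode_2566.py | minMaxDifference
-- ===== SOURCE A (Python) =====
-- def minMaxDifference(num):
--     num_str = str(num)
--
--     max_target = ''
--     min_target = ''
--
--     max_number = ''
--     min_number = ''
--
--     for digit in num_str:
--         if max_target == '' and digit != '9':
--             max_target = digit
--         if min_target == '':
--             min_target = digit
--
--         if max_target == digit and min_target == digit:
--             max_number += '9'
--             min_number += '0'
--         elif max_target == digit:
--             max_number += '9'
--             min_number += digit
--         elif min_target == digit:
--             max_number += digit
--             min_number += '0'
--         else: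
--             max_number += digit
--             min_number += digit
--
--     return int(max_number) - int(min_number)
-- ===== SOURCE B (Python) =====
-- def _pivot(s):
--     # first character that is not '9'; returns '9' (an identity substitution) when all are
--     if len(s) == 1 or s[0] != '9':
--         return s[0]
--     return _pivot(s[1:])
--
-- def _subst(s, old, new):
--     # recursive character substitution
--     if not s:
--         return ''
--     return (new if s[0] == old else s[0]) + _subst(s[1:], old, new)
--
-- def minMaxDifference(num):
--     s = str(num)
--     return int(_subst(s, _pivot(s), '9')) - int(_subst(s, s[0], '0'))
-- ===== Notes on version B (the rewrite author's own statement) =====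
-- stated objective: alternative
-- what changed: Replaces A's single stateful four-branch loop (discovering two targets on the fly while appending to two output strings) with a pure recursive decomposition: a recursive pivot search returning '9' as an identity substitution when all digits are 9 (so no all-9s special case), plus one recursive substitution helper applied twice.
import Mathlib
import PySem

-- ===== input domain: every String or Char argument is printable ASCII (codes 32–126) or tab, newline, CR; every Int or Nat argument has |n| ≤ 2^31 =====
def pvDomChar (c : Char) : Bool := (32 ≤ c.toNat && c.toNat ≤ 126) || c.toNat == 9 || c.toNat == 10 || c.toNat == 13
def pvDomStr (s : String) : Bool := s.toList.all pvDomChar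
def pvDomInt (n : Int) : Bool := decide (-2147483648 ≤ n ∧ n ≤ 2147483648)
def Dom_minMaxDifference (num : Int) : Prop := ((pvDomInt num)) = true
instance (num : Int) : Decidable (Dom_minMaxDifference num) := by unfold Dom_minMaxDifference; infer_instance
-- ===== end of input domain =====

-- B replaces A's stateful four-branch loop with a recursive pivot search ('9' as identity default,
-- removing the all-9s case) plus one recursive substitution helper used twice (objective: alternative).

-- ===== PORT A =====
-- state = (max_target, min_target, max_number, min_number); Python's '' / 1-char strings are [] / [c] on the List Char side
def aStep (st : List Char × List Char × List Char × List Char) (digit : Char) :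
    List Char × List Char × List Char × List Char :=
  let mt := if st.1 = [] ∧ digit ≠ '9' then [digit] else st.1
  let nt := if st.2.1 = [] then [digit] else st.2.1
  if mt = [digit] ∧ nt = [digit] then (mt, nt, st.2.2.1 ++ ['9'], st.2.2.2 ++ ['0'])
  else if mt = [digit] then (mt, nt, st.2.2.1 ++ ['9'], st.2.2.2 ++ [digit])
  else if nt = [digit] then (mt, nt, st.2.2.1 ++ [digit], st.2.2.2 ++ ['0'])
  else (mt, nt, st.2.2.1 ++ [digit], st.2.2.2 ++ [digit])

def minMaxDifference (num : Int) : Int :=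
  let numStr := PySem.Int.toChars num                     -- str(num)
  let r := numStr.foldl aStep ([], [], [], [])            -- the for-loop
  -- int() never raises here (the built strings are sign/digit strings): .getD 0 is the unreachable-none default
  (PySem.Int.ofChars? r.2.2.1).getD 0 - (PySem.Int.ofChars? r.2.2.2).getD 0

-- ===== PORT B =====
-- _pivot(s): 'if len(s) == 1 or s[0] != '9': return s[0]; return _pivot(s[1:])'
-- (Python raises IndexError on ''; B never calls it on '', the [] value here is arbitrary)
def bPivot : List Char → Char
  | [] => '9'
  | c :: rest => if rest.length = 0 ∨ c ≠ '9' then c else bPivot rest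

-- _subst(s, old, new): '(new if s[0] == old else s[0]) + _subst(s[1:], old, new)'
def bSubst (s : List Char) (old new : Char) : List Char :=
  match s with
  | [] => []
  | c :: rest => (if c = old then new else c) :: bSubst rest old new

def minMaxDifference_alt (num : Int) : Int :=
  let s := PySem.Int.toChars num                          -- s = str(num)
  let lo := match PySem.List.pyGet? s 0 with              -- s[0]; str(num) is never empty,
    | some c => c                                         -- so the none branch (Python: IndexError) is unreachable
    | none => '0'
  (PySem.Int.ofChars? (bSubst s (bPivot s) '9')).getD 0 -
    (PySem.Int.ofChars? (bSubst s lo '0')).getD 0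

-- ===== PRECONDITION & SPEC =====
def Spec_minMaxDifference (num : Int) (out : Int) : Prop := out = minMaxDifference_alt num
instance (num : Int) (out : Int) : Decidable (Spec_minMaxDifference num out) := by unfold Spec_minMaxDifference; infer_instance

-- ===== CLAIM (what is proved, stated in full; the proofs are below) =====
def Claim_equal_minMaxDifference : Prop := ∀ (num : Int), Dom_minMaxDifference num → Spec_minMaxDifference num (minMaxDifference num)

-- ===== LEMMAS AND PROOFS =====

-- per-character substitutions both programs effectively perform
def subst9 (c d : Char) : Char := if d = c then '9' else d
def subst0 (c d : Char) : Char := if d = c then '0' else d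

-- the max string as a function of the input characters
def amx (l : List Char) : List Char :=
  match l.find? (· != '9') with
  | some c => l.map (subst9 c)
  | none => l

-- steady state: both targets fixed, the loop maps each remaining char independently
theorem aFold_steady (l : List Char) (a b : Char) (mx mn : List Char) :
    l.foldl aStep ([a], [b], mx, mn) = ([a], [b], mx ++ l.map (subst9 a), mn ++ l.map (subst0 b)) := by
  induction l generalizing mx mn with
  | nil => simp
  | cons d t ih =>
    simp only [List.foldl_cons, List.map_cons]
    have hstep : aStep ([a], [b], mx, mn) d = ([a], [b], mx ++ [subst9 a d], mn ++ [subst0 b d]) := by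
      simp only [aStep, subst9, subst0]
      by_cases hab : a = d <;> by_cases hbb : b = d <;> simp [hab, hbb] <;> simp_all [eq_comm]
    rw [hstep, ih]
    simp

theorem subst9_nine (c : Char) : subst9 c '9' = '9' := by
  simp only [subst9]; split <;> rfl

theorem amx_nine_cons (t : List Char) : amx ('9' :: t) = '9' :: amx t := by
  simp only [amx, List.find?_cons]
  norm_num
  cases t.find? (· != '9') <;> simp [subst9_nine]

-- leading-nines phase: max_target still '', min_target = '9'
theorem aFold_nines (l : List Char) (mx mn : List Char) :
    l.foldl aStep ([], ['9'], mx, mn) =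
      ((match l.find? (· != '9') with | some c => [c] | none => []), ['9'],
        mx ++ amx l, mn ++ l.map (subst0 '9')) := by
  induction l generalizing mx mn with
  | nil => simp [amx]
  | cons d t ih =>
    by_cases h9 : d = '9'
    · subst h9
      have hstep : aStep ([], ['9'], mx, mn) '9' = ([], ['9'], mx ++ ['9'], mn ++ ['0']) := by
        simp [aStep]
      have hb9 : (('9' : Char) != '9') = false := rfl
      rw [List.foldl_cons, hstep, ih, amx_nine_cons]
      simp [subst0]
    · have hstep : aStep ([], ['9'], mx, mn) d = ([d], ['9'], mx ++ ['9'], mn ++ [d]) := by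
        simp only [aStep]
        simp [h9, Ne.symm h9]
      have hb : (d != '9') = true := by simp [h9]
      simp only [List.foldl_cons, hstep, aFold_steady, amx, List.find?_cons, hb]
      simp [subst9, subst0, h9]

-- A's loop, from the initial state: the built strings in closed form
theorem aFold_closed (l : List Char) :
    (l.foldl aStep ([], [], [], [])).2.2 =
      (amx l, match l with | [] => [] | c0 :: _ => l.map (subst0 c0)) := by
  cases l with
  | nil => simp [amx]
  | cons c0 t =>
    by_cases h9 : c0 = '9'
    · subst h9
      have hstep : aStep ([], [], [], []) '9' = ([], ['9'], ['9'], ['0']) := by simp [aStep]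
      simp only [List.foldl_cons, hstep, aFold_nines, amx_nine_cons, List.map_cons]
      simp [subst0]
    · have hstep : aStep ([], [], [], []) c0 = ([c0], [c0], ['9'], ['0']) := by
        simp [aStep, h9]
      have hf : List.find? (· != '9') (c0 :: t) = some c0 := by
        simp [h9]
      simp only [List.foldl_cons, hstep, aFold_steady, amx, hf, List.map_cons]
      simp [subst9, subst0]

-- B's recursive substitution is a per-character map
theorem bSubst_eq_map (l : List Char) (old new : Char) :
    bSubst l old new = l.map (fun d => if d = old then new else d) := by
  induction l with
  | nil => rfl
  | cons c t ih => simp [bSubst, ih]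

-- B's recursive pivot is the first non-'9' character, '9' by default
theorem bPivot_eq_find (l : List Char) : bPivot l = (l.find? (· != '9')).getD '9' := by
  induction l with
  | nil => rfl
  | cons c t ih =>
    by_cases h9 : c = '9'
    · subst h9
      cases t with
      | nil => rfl
      | cons d u => simpa [bPivot] using ih
    · simp [bPivot, h9]

-- substituting '9' for '9' is the identity on an all-'9' list
theorem map_subst9_nine_of_find_none (l : List Char) (h : l.find? (· != '9') = none) :
    l.map (subst9 '9') = l := by
  have hall := List.find?_eq_none.mp h
  induction l with
  | nil => rfl
  | cons c t ih =>
    have hc : c = '9' := by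
      have := hall c (List.mem_cons_self)
      simpa using this
    subst hc
    simp only [List.map_cons, subst9_nine]
    refine congrArg _ (ih ?_ ?_)
    · simpa [List.find?_cons] using h
    · intro x hx; exact hall x (List.mem_cons_of_mem _ hx)

-- B's max string equals A's
theorem bSubst_max_eq_amx (l : List Char) : bSubst l (bPivot l) '9' = amx l := by
  rw [bSubst_eq_map, bPivot_eq_find]
  cases hf : l.find? (· != '9') with
  | none =>
    simpa [amx, hf, subst9] using map_subst9_nine_of_find_none l hf
  | some c =>
    simp [amx, hf, subst9]

-- ===== VERDICT (by name: the statement is the Claim_ definition above) =====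
theorem minMaxDifference_spec : Claim_equal_minMaxDifference := by
  intro num _
  unfold Spec_minMaxDifference minMaxDifference minMaxDifference_alt
  have hc := aFold_closed (PySem.Int.toChars num)
  cases hl : PySem.Int.toChars num with
  | nil =>
    simp only [hl] at hc ⊢
    rw [show ((([] : List Char).foldl aStep ([], [], [], [])).2.2.1) = amx [] from congrArg Prod.fst hc,
        show ((([] : List Char).foldl aStep ([], [], [], [])).2.2.2) = [] from congrArg Prod.snd hc]
    simp [amx, bSubst]
  | cons c0 t =>
    simp only [hl] at hc ⊢
    rw [show (((c0 :: t).foldl aStep ([], [], [], [])).2.2.1) = amx (c0 :: t) from congrArg Prod.fst hc,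
        show (((c0 :: t).foldl aStep ([], [], [], [])).2.2.2) = (c0 :: t).map (subst0 c0) from congrArg Prod.snd hc]
    have hget : PySem.List.pyGet? (c0 :: t) (0 : Int) = some c0 := by
      simp
    rw [hget, bSubst_max_eq_amx, bSubst_eq_map,
        show (fun d => if d = c0 then '0' else d) = subst0 c0 from funext fun d => rfl]
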